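-- pv_equiv track=rewrite | github.com/ShushanArakelyan/ccg_parser | parser.py | fill_whitespace_in_quote
-- ===== SOURCE A (Python) =====
-- SPECIAL_CHARS = {' ': '_', '(': '[LEFT_BRACKET]', ')': '[RIGHT_BRACKET]',
--                  '.': '[DOT]', ',': '[COMMA]', '-': '[HYPHEN]', '\'': '[APOSTROPHE]'}
--
-- def fill_whitespace_in_quote(sentence: str):
--     """
--     Args:
--         sentence: A string containing multiple sentences.
--
--     Fills all whitespaces in a quotation mark into underscore.
--     """
--
--     def convert_special_chars(s, flag):
--         return SPECIAL_CHARS[s] if s in SPECIAL_CHARS and flag else s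
--
--     flag = False  # whether space should be turned into underscore, currently
--     output_sentence = ''
--     for i in range(len(sentence)):
--         if sentence[i] == "\"":
--             flag = not flag  # flip the flag if a quote mark appears
--         output_sentence += convert_special_chars(sentence[i], flag)
--     return output_sentence
-- ===== SOURCE B (Python) =====
-- SPECIAL_CHARS = {' ': '_', '(': '[LEFT_BRACKET]', ')': '[RIGHT_BRACKET]',
--                  '.': '[DOT]', ',': '[COMMA]', '-': '[HYPHEN]', '\'': '[APOSTROPHE]'}
--
-- def fill_whitespace_in_quote(sentence: str):
--     table = str.maketrans(SPECIAL_CHARS)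
--     parts = sentence.split('"')
--     for i in range(1, len(parts), 2):
--         parts[i] = parts[i].translate(table)
--     return '"'.join(parts)
-- ===== Notes on version B (the rewrite author's own statement) =====
-- stated objective: faster
-- what changed: Replaces the per-character flag-toggling loop with a segment-based transform: split the sentence on the quote character, translate only the odd-indexed (inside-quote) segments with a precomputed translation table, and rejoin.
import Mathlib
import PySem

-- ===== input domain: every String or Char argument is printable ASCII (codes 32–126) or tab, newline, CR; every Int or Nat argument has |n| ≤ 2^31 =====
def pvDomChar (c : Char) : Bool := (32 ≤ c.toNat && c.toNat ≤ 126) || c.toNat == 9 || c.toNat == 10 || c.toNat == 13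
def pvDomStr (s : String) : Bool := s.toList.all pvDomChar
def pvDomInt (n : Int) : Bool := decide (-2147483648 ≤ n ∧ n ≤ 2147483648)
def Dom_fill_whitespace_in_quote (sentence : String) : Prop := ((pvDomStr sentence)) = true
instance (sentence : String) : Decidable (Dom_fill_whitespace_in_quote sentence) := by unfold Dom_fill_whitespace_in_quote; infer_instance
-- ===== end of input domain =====

-- B replaces A's per-character flag loop by split-on-quote / translate odd segments / rejoin (idiomatic decomposition).

-- ===== PORT A =====
-- SPECIAL_CHARS lookup: 'c in SPECIAL_CHARS' + 'SPECIAL_CHARS[c]' as an Option lookup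
def pvSpecial (c : Char) : Option (List Char) :=
  if c = ' ' then some ['_']
  else if c = '(' then some "[LEFT_BRACKET]".toList
  else if c = ')' then some "[RIGHT_BRACKET]".toList
  else if c = '.' then some "[DOT]".toList
  else if c = ',' then some "[COMMA]".toList
  else if c = '-' then some "[HYPHEN]".toList
  else if c = '\'' then some "[APOSTROPHE]".toList
  else none

-- convert_special_chars(s, flag): SPECIAL_CHARS[s] if s in SPECIAL_CHARS and flag else s
def pvConvert (c : Char) (flag : Bool) : List Char :=
  match pvSpecial c with
  | some r => if flag then r else [c]
  | none => [c]

-- the for-loop over the characters, state = (flag, output_sentence) (strings as List Char)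
def fill_whitespace_in_quote (sentence : String) : String :=
  let st := sentence.toList.foldl
    (fun (st : Bool × List Char) c =>
      let flag := if c = '"' then !st.1 else st.1
      (flag, st.2 ++ pvConvert c flag))
    (false, [])
  String.ofList st.2

-- ===== PORT B =====
-- str.maketrans(SPECIAL_CHARS) + str.translate: per-character table substitution
def pvTrChar (c : Char) : List Char := (pvSpecial c).getD [c]
def pvTranslate (s : List Char) : List Char := s.flatMap pvTrChar

-- sentence.split('"') on char lists (exact: Python's str.split with a 1-char separator)
def pvSplitQ : List Char → List (List Char)
  | [] => [[]]
  | c :: cs =>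
    if c = '"' then [] :: pvSplitQ cs
    else
      match pvSplitQ cs with
      | [] => [[c]]          -- unreachable: pvSplitQ is never []
      | p :: ps => (c :: p) :: ps

-- the 'for i in range(1, len(parts), 2): parts[i] = parts[i].translate(table)' loop, carrying the index
def pvReplaceOdd (i : Nat) : List (List Char) → List (List Char)
  | [] => []
  | p :: ps => (if i % 2 = 1 then pvTranslate p else p) :: pvReplaceOdd (i + 1) ps

-- '"'.join(parts) (exact: Python's str.join)
def pvJoinQ : List (List Char) → List Char
  | [] => []
  | [p] => p
  | p :: ps => p ++ '"' :: pvJoinQ ps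

def fill_whitespace_in_quote_alt (sentence : String) : String :=
  String.ofList (pvJoinQ (pvReplaceOdd 0 (pvSplitQ sentence.toList)))

-- ===== PRECONDITION & SPEC =====
def Spec_fill_whitespace_in_quote (sentence : String) (out : String) : Prop := out = fill_whitespace_in_quote_alt sentence
instance (sentence : String) (out : String) : Decidable (Spec_fill_whitespace_in_quote sentence out) := by unfold Spec_fill_whitespace_in_quote; infer_instance

-- ===== CLAIM (what is proved, stated in full; the proofs are below) =====
def Claim_equal_fill_whitespace_in_quote : Prop := ∀ (sentence : String), Dom_fill_whitespace_in_quote sentence → Spec_fill_whitespace_in_quote sentence (fill_whitespace_in_quote sentence)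

-- ===== LEMMAS AND PROOFS =====

-- A's loop in direct-recursion form
def procA (flag : Bool) : List Char → List Char
  | [] => []
  | c :: cs =>
    let flag' := if c = '"' then !flag else flag
    pvConvert c flag' ++ procA flag' cs

theorem foldl_procA (cs : List Char) : ∀ (flag : Bool) (acc : List Char),
    (cs.foldl (fun (st : Bool × List Char) c =>
      let flag := if c = '"' then !st.1 else st.1
      (flag, st.2 ++ pvConvert c flag)) (flag, acc)).2 = acc ++ procA flag cs := by
  induction cs with
  | nil => intro flag acc; simp [procA]
  | cons c cs ih =>
    intro flag acc
    simp only [List.foldl, procA, ih, List.append_assoc]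

theorem splitQ_ne_nil (cs : List Char) : pvSplitQ cs ≠ [] := by
  induction cs with
  | nil => simp [pvSplitQ]
  | cons c cs ih =>
    simp only [pvSplitQ]
    split
    · simp
    · cases h : pvSplitQ cs with
      | nil => exact absurd h ih
      | cons p ps => simp

-- B's indexed replacement only depends on the parity of the index
def replB (b : Bool) : List (List Char) → List (List Char)
  | [] => []
  | p :: ps => (if b then pvTranslate p else p) :: replB (!b) ps

theorem replaceOdd_eq_replB (ps : List (List Char)) : ∀ (i : Nat),
    pvReplaceOdd i ps = replB (decide (i % 2 = 1)) ps := by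
  induction ps with
  | nil => intro i; simp [pvReplaceOdd, replB]
  | cons p ps ih =>
    intro i
    simp only [pvReplaceOdd, replB, ih (i + 1)]
    rcases Nat.mod_two_eq_zero_or_one i with h | h <;> simp [Nat.add_mod, h]

theorem replB_ne_nil (b : Bool) (l : List (List Char)) (h : l ≠ []) : replB b l ≠ [] := by
  cases l with
  | nil => exact absurd rfl h
  | cons p ps => simp [replB]

theorem joinQ_cons (p q : List Char) (qs : List (List Char)) :
    pvJoinQ (p :: q :: qs) = p ++ '"' :: pvJoinQ (q :: qs) := by
  simp [pvJoinQ]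

theorem joinQ_append (x p : List Char) (ps : List (List Char)) :
    pvJoinQ ((x ++ p) :: ps) = x ++ pvJoinQ (p :: ps) := by
  cases ps <;> simp [pvJoinQ]

theorem convert_false (c : Char) : pvConvert c false = [c] := by
  cases h : pvSpecial c <;> simp [pvConvert, h]

theorem convert_true (c : Char) : pvConvert c true = pvTrChar c := by
  cases h : pvSpecial c <;> simp [pvConvert, pvTrChar, h]

-- the core correspondence: A's flag loop = join of the alternately-translated split
theorem procA_eq (cs : List Char) : ∀ (flag : Bool),
    procA flag cs = pvJoinQ (replB flag (pvSplitQ cs)) := by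
  induction cs with
  | nil =>
    intro flag
    cases flag <;> simp [procA, pvSplitQ, replB, pvJoinQ, pvTranslate]
  | cons c cs ih =>
    intro flag
    by_cases hq : c = '"'
    · subst hq
      have hne : replB (!flag) (pvSplitQ cs) ≠ [] := replB_ne_nil _ _ (splitQ_ne_nil cs)
      cases h : replB (!flag) (pvSplitQ cs) with
      | nil => exact absurd h hne
      | cons q qs =>
        have ihn := ih (!flag)
        rw [h] at ihn
        cases flag <;>
          · simp only [Bool.not_false, Bool.not_true] at h ihn
            simp [procA, pvSplitQ, replB, pvConvert, pvSpecial, pvTranslate, h, joinQ_cons, ihn]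
    · cases hps : pvSplitQ cs with
      | nil => exact absurd hps (splitQ_ne_nil cs)
      | cons p ps =>
        have ihf := ih flag
        rw [hps] at ihf
        simp only [procA, pvSplitQ, hps, replB, if_neg hq]
        cases flag
        · simp only [Bool.false_eq_true, if_false, Bool.not_false] at ihf ⊢
          rw [show (c :: p) = [c] ++ p from rfl, joinQ_append]
          simp [ihf, convert_false, replB]
        · simp only [if_true, Bool.not_true] at ihf ⊢
          rw [show pvTranslate (c :: p) = pvTrChar c ++ pvTranslate p by simp [pvTranslate],
              joinQ_append]
          simp [ihf, convert_true, replB]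

-- ===== VERDICT (by name: the statement is the Claim_ definition above) =====
theorem fill_whitespace_in_quote_spec : Claim_equal_fill_whitespace_in_quote := by
  intro sentence _
  unfold Spec_fill_whitespace_in_quote fill_whitespace_in_quote fill_whitespace_in_quote_alt
  simp only [foldl_procA, List.nil_append, procA_eq, replaceOdd_eq_replB]
  norm_num
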